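-- pv_equiv track=rewrite | github.com/MarcioSmall/merlin | calc/calculator/variable.py | prepara_nome_variavel
-- ===== SOURCE A (Python) =====
-- def prepara_nome_variavel(nome_var):
--     nome = nome_var.upper()
--     nome = nome_var.strip()
--     nome = nome_var.replace('\n', ' ')
--     nome_var = ''
--     for letra in nome:
--         if letra in ' +-*/^?><,;:=!"%[]()|':
--             break
--         nome_var += letra
--     return (nome_var)
-- ===== SOURCE B (Python) =====
-- SPECIALS = ' +-*/^?><,;:=!"%[]()|'
--
-- def prepara_nome_variavel(nome_var):
--     s = nome_var.replace('\n', ' ')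
--     cut = len(s)
--     for ch in SPECIALS:
--         j = s.find(ch)
--         if 0 <= j < cut:
--             cut = j
--     return s[:cut]
-- ===== Notes on version B (the rewrite author's own statement) =====
-- stated objective: faster
-- what changed: B replaces A's per-character accumulator loop (break on the first special character) by taking, for each of the 21 special characters, its first position via str.find, minimising them, and slicing the prefix once.
import Mathlib
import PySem

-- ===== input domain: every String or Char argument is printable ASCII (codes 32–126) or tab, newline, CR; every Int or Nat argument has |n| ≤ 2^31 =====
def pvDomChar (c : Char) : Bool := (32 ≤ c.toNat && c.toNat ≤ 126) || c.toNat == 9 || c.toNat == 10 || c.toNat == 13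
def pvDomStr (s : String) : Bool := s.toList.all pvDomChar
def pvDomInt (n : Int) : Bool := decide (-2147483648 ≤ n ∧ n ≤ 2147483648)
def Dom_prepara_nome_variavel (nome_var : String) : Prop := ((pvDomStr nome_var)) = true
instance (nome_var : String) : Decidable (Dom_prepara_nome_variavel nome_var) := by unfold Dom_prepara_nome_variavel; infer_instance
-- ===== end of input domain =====

-- B finds the same prefix-before-first-special-character by minimising the per-special-character
-- str.find positions and slicing once, instead of A's per-character accumulator loop with break (measured faster).


-- the special-character string ' +-*/^?><,;:=!"%[]()|' both Pythons test against
def pvSpecials : List Char := " +-*/^?><,;:=!\"%[]()|".toList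

-- ===== PORT A =====
-- A's for-loop with break: accumulate characters until a special one is seen
def pvLoopA : List Char → List Char → List Char
  | [], acc => acc
  | c :: rest, acc =>
      if PySem.Chars.isIn [c] pvSpecials then acc else pvLoopA rest (acc ++ [c])

def prepara_nome_variavel (nome_var : String) : String :=
  let _nome₁ := PySem.Str.upper nome_var      -- dead store in A, kept for faithfulness
  let _nome₂ := PySem.Str.strip nome_var      -- dead store in A, kept for faithfulness
  let nome := (PySem.Str.replace nome_var "\n" " ").toList
  String.ofList (pvLoopA nome [])

-- ===== PORT B =====
-- B: cut = min over special characters of s.find(ch) (−1 skipped), then return s[:cut]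
def prepara_nome_variavel_alt (nome_var : String) : String :=
  let s := (PySem.Str.replace nome_var "\n" " ").toList
  let cut := pvSpecials.foldl
    (fun cut ch =>
      let j := PySem.Chars.find s [ch]
      if 0 ≤ j ∧ j < cut then j else cut)
    (s.length : Int)
  String.ofList (PySem.List.slice s none (some cut))

-- ===== PRECONDITION & SPEC =====
def Spec_prepara_nome_variavel (nome_var : String) (out : String) : Prop := out = prepara_nome_variavel_alt nome_var
instance (nome_var : String) (out : String) : Decidable (Spec_prepara_nome_variavel nome_var out) := by unfold Spec_prepara_nome_variavel; infer_instance

-- ===== CLAIM (what is proved, stated in full; the proofs are below) =====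
def Claim_equal_prepara_nome_variavel : Prop := ∀ (nome_var : String), Dom_prepara_nome_variavel nome_var → Spec_prepara_nome_variavel nome_var (prepara_nome_variavel nome_var)

-- ===== LEMMAS AND PROOFS =====

-- 'c in specials' (single-character substring test) is list membership
theorem pv_isIn_single (c : Char) (s : List Char) :
    PySem.Chars.isIn [c] s = s.contains c := by
  rw [Bool.eq_iff_iff, PySem.Chars.isIn_iff_infix, List.singleton_infix_iff]
  simp

-- A's loop is takeWhile of the complement test
theorem pvLoopA_eq (l acc : List Char) :
    pvLoopA l acc = acc ++ l.takeWhile (fun c => !pvSpecials.contains c) := by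
  induction l generalizing acc with
  | nil => simp [pvLoopA]
  | cons c rest ih =>
    rw [pvLoopA, pv_isIn_single]
    cases hc : pvSpecials.contains c with
    | true =>
      have hm : c ∈ pvSpecials := by simpa using hc
      simp [hm]
    | false =>
      have hm : c ∉ pvSpecials := by simpa using hc
      simp [hm, ih]

-- find of a single-character substring is findIdx of that character (or -1 when absent)
theorem pv_find_single (s : List Char) (ch : Char) :
    PySem.Chars.find s [ch]
      = if ch ∈ s then (s.findIdx (· == ch) : Int) else -1 := by
  by_cases h : ch ∈ s
  · have h0 : 0 ≤ PySem.Chars.find s [ch] :=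
      (PySem.Chars.find_nonneg_iff s [ch]).mpr ((List.singleton_infix_iff ch s).mpr h)
    obtain ⟨hpre, hmin⟩ := PySem.Chars.find_spec h0
    set j := (PySem.Chars.find s [ch]).toNat with hj
    obtain ⟨t, ht⟩ := hpre
    have hjlt : j < s.length := by
      have : (s.drop j).length ≠ 0 := by rw [← ht]; simp
      simp only [List.length_drop] at this
      omega
    have hget : s[j]? = some ch := by
      rw [← List.head?_drop, ← ht]
      simp
    have hidx : s.findIdx (· == ch) = j := by
      rw [List.findIdx_eq hjlt]
      constructor
      · have : s[j] = ch := by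
          have := List.getElem?_eq_getElem hjlt
          rw [this] at hget; exact Option.some.inj hget
        simp [this]
      · intro i hij
        simp only [beq_eq_false_iff_ne, ne_eq]
        intro hpi
        apply hmin i hij
        have hil : i < s.length := by omega
        refine ⟨s.drop (i + 1), ?_⟩
        rw [List.drop_eq_getElem_cons hil, hpi]
        rfl
    rw [if_pos h, hidx]
    omega
  · rw [if_neg h]
    exact (PySem.Chars.find_eq_neg_one_iff s [ch]).mpr
      (fun hc => h ((List.singleton_infix_iff ch s).mp hc))

theorem pv_findIdx_or (l : List Char) (p q : Char → Bool) :
    l.findIdx (fun c => p c || q c) = min (l.findIdx p) (l.findIdx q) := by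
  induction l with
  | nil => simp
  | cons c t ih =>
    simp only [List.findIdx_cons]
    cases hp : p c <;> cases hq : q c <;>
      simp only [Bool.or_true, Bool.or_false, cond_true, cond_false, ih] <;> omega

theorem pv_findIdx_congr (l : List Char) (p q : Char → Bool)
    (h : ∀ x ∈ l, p x = q x) : l.findIdx p = l.findIdx q := by
  induction l with
  | nil => simp
  | cons c t ih =>
    simp only [List.findIdx_cons, h c (by simp)]
    rw [ih (fun x hx => h x (by simp [hx]))]

-- one fold step of B turns 'findIdx P' into 'findIdx (P ∨ · == ch)'
theorem pv_fold_step (l : List Char) (P : Char → Bool) (ch : Char) :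
    (if 0 ≤ PySem.Chars.find l [ch] ∧ PySem.Chars.find l [ch] < (l.findIdx P : Int)
       then PySem.Chars.find l [ch] else (l.findIdx P : Int))
      = (l.findIdx (fun c => P c || c == ch) : Int) := by
  rw [pv_find_single, pv_findIdx_or]
  by_cases h : ch ∈ l
  · rw [if_pos h]
    split_ifs <;> push_cast <;> omega
  · rw [if_neg h]
    have : l.findIdx (· == ch) = l.length :=
      List.findIdx_eq_length.mpr (by
        intro x hx
        simp only [beq_eq_false_iff_ne, ne_eq]
        rintro rfl; exact h hx)
    have hle : l.findIdx P ≤ l.length := List.findIdx_le_length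
    rw [this]
    split_ifs <;> omega

-- B's whole fold computes findIdx of the union predicate
theorem pv_fold_find (S l : List Char) (P : Char → Bool) :
    S.foldl
      (fun cut ch =>
        let j := PySem.Chars.find l [ch]
        if 0 ≤ j ∧ j < cut then j else cut)
      ((l.findIdx P : Int))
    = (l.findIdx (fun c => P c || S.contains c) : Int) := by
  induction S generalizing P with
  | nil => simp
  | cons ch S' ih =>
    rw [List.foldl_cons]
    show S'.foldl _ (if 0 ≤ PySem.Chars.find l [ch] ∧ PySem.Chars.find l [ch] < (l.findIdx P : Int)
       then PySem.Chars.find l [ch] else (l.findIdx P : Int)) = _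
    rw [pv_fold_step, ih]
    congr 1
    apply pv_findIdx_congr
    intro x _
    have hbe : (x == ch) = decide (x = ch) := by rw [Bool.eq_iff_iff]; simp
    simp [Bool.or_assoc, hbe]

theorem pv_take_findIdx (l : List Char) (p : Char → Bool) :
    l.take (l.findIdx p) = l.takeWhile (fun c => !p c) := by
  rw [List.takeWhile_eq_take_findIdx_not]
  simp

-- ===== VERDICT (by name: the statement is the Claim_ definition above) =====
theorem prepara_nome_variavel_spec : Claim_equal_prepara_nome_variavel := by
  intro nome_var _
  show prepara_nome_variavel nome_var = prepara_nome_variavel_alt nome_var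
  show String.ofList (pvLoopA ((PySem.Str.replace nome_var "\n" " ").toList) []) =
    String.ofList (PySem.List.slice ((PySem.Str.replace nome_var "\n" " ").toList) none
      (some (pvSpecials.foldl
        (fun cut ch =>
          let j := PySem.Chars.find ((PySem.Str.replace nome_var "\n" " ").toList) [ch]
          if 0 ≤ j ∧ j < cut then j else cut)
        (((PySem.Str.replace nome_var "\n" " ").toList).length : Int))))
  generalize (PySem.Str.replace nome_var "\n" " ").toList = s
  have hinit : (s.length : Int) = ((s.findIdx (fun _ => false) : Nat) : Int) := by
    rw [List.findIdx_eq_length.mpr (by simp)]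
  rw [hinit, pv_fold_find pvSpecials s (fun _ => false)]
  rw [PySem.List.slice_to_natCast]
  rw [pv_take_findIdx s (fun c => (false || pvSpecials.contains c))]
  rw [pvLoopA_eq]
  simp
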